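-- pv_equiv track=rewrite | github.com/pedronaugusto/perspicacity | reference/python/serialize.py | _find_vec3_token
-- ===== SOURCE A (Python) =====
-- from typing import Dict, List, Optional, Tuple
--
-- def _find_vec3_token(tokens: List[str], start: int) -> Tuple[str, int]:
--     """Find a complete Vec3 token starting at index start.
--
--     Vec3 may be split across tokens if it contains spaces (shouldn't normally,
--     but handle gracefully). Returns (vec3_string, next_index).
--     """
--     combined = tokens[start]
--     idx = start
--     while combined.count("[") > combined.count("]"):
--         idx += 1
--         if idx >= len(tokens):
--             break
--         combined += "," + tokens[idx]
--     return combined, idx + 1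
-- ===== SOURCE B (Python) =====
-- from typing import List, Tuple
--
--
-- def _find_vec3_token(tokens: List[str], start: int) -> Tuple[str, int]:
--     """Find a complete Vec3 token starting at index start.
--
--     Staged: first compute per-token bracket deltas, then scan the running
--     balance only to locate the cut index k, and finally build the string once
--     from the index range -- no string is grown or rescanned in the loop.
--     """
--     n = len(tokens)
--     deltas = [t.count("[") - t.count("]") for t in tokens]
--     bal = 0
--     k = start
--     while k < n:
--         bal += deltas[k]
--         if bal <= 0:
--             break
--         k += 1
--     end = min(k + 1, n)
--     return ",".join(tokens[j] for j in range(start, end)), k + 1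
-- ===== Notes on version B (the rewrite author's own statement) =====
-- stated objective: alternative
-- what changed: B is staged: it first computes a per-token bracket-delta table for the list, then scans only the running balance to find the cut index k (building no string in the loop), and finally joins the tokens of the index range start..min(k,n-1) once; A instead grows one string and re-counts all its brackets on every loop test.
import Mathlib
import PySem

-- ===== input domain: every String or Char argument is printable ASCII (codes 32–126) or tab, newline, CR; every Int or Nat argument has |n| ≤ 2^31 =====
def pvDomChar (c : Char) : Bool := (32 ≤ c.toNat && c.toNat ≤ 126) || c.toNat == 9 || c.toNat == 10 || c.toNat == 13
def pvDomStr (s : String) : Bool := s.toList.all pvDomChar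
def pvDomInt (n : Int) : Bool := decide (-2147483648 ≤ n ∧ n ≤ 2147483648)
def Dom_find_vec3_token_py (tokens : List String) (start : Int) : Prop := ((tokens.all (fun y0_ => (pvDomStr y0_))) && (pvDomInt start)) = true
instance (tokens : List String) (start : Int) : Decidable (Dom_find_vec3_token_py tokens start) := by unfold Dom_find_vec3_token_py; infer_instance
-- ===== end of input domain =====

-- B is staged (per-token bracket-delta table, balance scan that only finds the cut index, one final
-- join over the index range) where A grows one string and re-counts all its brackets each test;
-- objective: alternative.

-- ===== PORT A =====
-- Loop of A: while combined.count("[") > combined.count("]"): idx += 1; break if idx >= len; append.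
-- Fuel 2*len+1 always suffices on admitted inputs (idx grows by 1 per iteration, starting ≥ -len).
def findA_loop (tokens : List String) : Nat → String → Int → String × Int
  | 0, combined, idx => (combined, idx + 1)
  | fuel+1, combined, idx =>
    if PySem.Str.count combined "]" < PySem.Str.count combined "[" then
      if (tokens.length : Int) ≤ idx + 1 then (combined, idx + 2)
      else findA_loop tokens fuel (combined ++ "," ++ PySem.List.pyGetD tokens (idx + 1) "") (idx + 1)
    else (combined, idx + 1)

def find_vec3_token_py (tokens : List String) (start : Int) : String × Int :=
  match PySem.List.pyGet? tokens start with
  | none => ("", 0)   -- tokens[start] raises IndexError: excluded by Pre_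
  | some t0 => findA_loop tokens (2 * tokens.length + 1) t0 start

-- ===== PORT B =====
-- while k < n: bal += deltas[k]; if bal <= 0: break; k += 1   — returns the final k.
def findB_loop (n : Int) (deltas : List Int) : Nat → Int → Int → Int
  | 0, _bal, k => k
  | fuel+1, bal, k =>
    if k < n then
      let bal' := bal + PySem.List.pyGetD deltas k 0
      if bal' ≤ 0 then k else findB_loop n deltas fuel bal' (k + 1)
    else k

def find_vec3_token_py_alt (tokens : List String) (start : Int) : String × Int :=
  let n : Int := tokens.length
  let deltas := tokens.map (fun t => (PySem.Str.count t "[" : Int) - (PySem.Str.count t "]" : Int))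
  let k := findB_loop n deltas (2 * tokens.length + 1) 0 start
  let e := min (k + 1) n
  (PySem.Str.join "," ((PySem.List.pyRange start e 1).map (fun j => PySem.List.pyGetD tokens j "")), k + 1)

-- ===== PRECONDITION & SPEC =====
-- Pre_: exactly the inputs on which A returns (tokens[start] does not raise IndexError).
def Pre_find_vec3_token_py (tokens : List String) (start : Int) : Prop :=
  PySem.Raise.InRange tokens.length start
instance (tokens : List String) (start : Int) : Decidable (Pre_find_vec3_token_py tokens start) := by
  unfold Pre_find_vec3_token_py; infer_instance
def pvWitness_find_vec3_token_py : List String × Int := (["[1", "2]"], 0)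

def Spec_find_vec3_token_py (tokens : List String) (start : Int) (out : String × Int) : Prop := out = find_vec3_token_py_alt tokens start
instance (tokens : List String) (start : Int) (out : String × Int) : Decidable (Spec_find_vec3_token_py tokens start out) := by unfold Spec_find_vec3_token_py; infer_instance

-- ===== CLAIM (what is proved, stated in full; the proofs are below) =====
def Claim_equal_find_vec3_token_py : Prop := ∀ (tokens : List String) (start : Int), Dom_find_vec3_token_py tokens start → Pre_find_vec3_token_py tokens start → Spec_find_vec3_token_py tokens start (find_vec3_token_py tokens start)

-- ===== LEMMAS AND PROOFS =====

-- Chars.count with a single-character needle is List.count (no PySem lemma covers this shape).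
theorem chars_count_go_single (c : Char) :
    ∀ (l : List Char) (fuel acc : Nat), l.length ≤ fuel →
      PySem.Chars.count.go [c] fuel l acc = acc + l.count c := by
  intro l
  induction l with
  | nil => intro fuel acc _; cases fuel <;> simp [PySem.Chars.count.go]
  | cons h t ih =>
    intro fuel acc hf
    cases fuel with
    | zero => simp at hf
    | succ f =>
      simp only [PySem.Chars.count.go]
      by_cases hc : c = h
      · subst hc
        simp only [List.isPrefixOf, beq_self_eq_true, Bool.and_self, if_pos,
          List.length_singleton, List.drop_one, List.tail_cons]
        rw [ih f (acc + 1) (by simpa using Nat.lt_succ_iff.mp (by simpa using hf))]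
        simp
        omega
      · have : [c].isPrefixOf (h :: t) = false := by
          simp [List.isPrefixOf, hc]
        rw [this]
        simp only [Bool.false_eq_true, if_false]
        rw [ih f acc (by simpa using Nat.lt_succ_iff.mp (by simpa using hf))]
        simp [(Ne.symm hc : h ≠ c)]

theorem chars_count_singleton (l : List Char) (c : Char) :
    PySem.Chars.count l [c] = l.count c := by
  unfold PySem.Chars.count
  simp only [List.isEmpty_cons, Bool.false_eq_true, if_false]
  simpa using chars_count_go_single c l l.length 0 le_rfl

theorem str_count_lb (s : String) : PySem.Str.count s "[" = s.toList.count '[' := by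
  rw [PySem.Str.count_eq]
  have h : ("[" : String).toList = ['['] := by decide
  rw [h, chars_count_singleton]

theorem str_count_rb (s : String) : PySem.Str.count s "]" = s.toList.count ']' := by
  rw [PySem.Str.count_eq]
  have h : ("]" : String).toList = [']'] := by decide
  rw [h, chars_count_singleton]

theorem chars_join_append_singleton (sep : List Char) :
    ∀ (rest : List (List Char)) (p t : List Char),
      PySem.Chars.join sep ((p :: rest) ++ [t]) =
        PySem.Chars.join sep (p :: rest) ++ sep ++ t := by
  intro rest
  induction rest with
  | nil =>
    intro p t
    show PySem.Chars.join sep (p :: t :: []) = _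
    rw [PySem.Chars.join_cons_cons, PySem.Chars.join_singleton, PySem.Chars.join_singleton]
  | cons q rest ih =>
    intro p t
    show PySem.Chars.join sep (p :: (q :: rest) ++ [t]) = _
    have h1 : p :: (q :: rest) ++ [t] = p :: (q :: (rest ++ [t])) := by simp
    rw [h1, PySem.Chars.join_cons_cons]
    have h2 : q :: (rest ++ [t]) = (q :: rest) ++ [t] := by simp
    rw [h2, ih q t, PySem.Chars.join_cons_cons]
    simp

theorem join_comma_append_singleton (p : String) (rest : List String) (t : String) :
    PySem.Str.join "," ((p :: rest) ++ [t]) = PySem.Str.join "," (p :: rest) ++ "," ++ t := by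
  apply String.toList_inj.mp
  simp only [PySem.Str.toList_join, String.toList_append, List.map_append, List.map_cons,
    List.map_nil]
  exact chars_join_append_singleton ",".toList (rest.map String.toList) p.toList t.toList

-- Abbreviations for the proof: J tokens start idx = ",".join(tokens[start..idx]) (Python indexing).
def pvJ (tokens : List String) (start idx : Int) : String :=
  PySem.Str.join "," ((PySem.List.pyRange start (idx + 1) 1).map (fun j => PySem.List.pyGetD tokens j ""))

def pvDeltas (tokens : List String) : List Int :=
  tokens.map (fun t => (PySem.Str.count t "[" : Int) - (PySem.Str.count t "]" : Int))

theorem pvDeltas_getD (tokens : List String) (i : Int) :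
    PySem.List.pyGetD (pvDeltas tokens) i 0 =
      (PySem.Str.count (PySem.List.pyGetD tokens i "") "[" : Int) -
      (PySem.Str.count (PySem.List.pyGetD tokens i "") "]" : Int) := by
  have h0 : (0 : Int) =
      (PySem.Str.count ("" : String) "[" : Int) - (PySem.Str.count ("" : String) "]" : Int) := by
    decide
  rw [pvDeltas, h0,
    PySem.List.pyGetD_map (fun t => (PySem.Str.count t "[" : Int) - (PySem.Str.count t "]" : Int))
      tokens i ""]

-- J extended by one token: split the range and use the join-append lemma.
theorem pvJ_succ (tokens : List String) (start idx : Int) (h : start ≤ idx) :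
    pvJ tokens start (idx + 1) = pvJ tokens start idx ++ "," ++ PySem.List.pyGetD tokens (idx + 1) "" := by
  unfold pvJ
  rw [PySem.List.pyRange_one_succ_right (by omega : start ≤ idx + 1)]
  rw [List.map_append]
  have hcons : PySem.List.pyRange start (idx + 1) 1 = start :: PySem.List.pyRange (start + 1) (idx + 1) 1 :=
    PySem.List.pyRange_one_cons (by omega)
  rw [hcons]
  simp only [List.map_cons, List.map_nil]
  exact join_comma_append_singleton _ _ _

-- bracket-count difference of J after appending one token.
theorem pvDiff_succ (tokens : List String) (start idx : Int) (h : start ≤ idx) :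
    (PySem.Str.count (pvJ tokens start (idx + 1)) "[" : Int) -
      (PySem.Str.count (pvJ tokens start (idx + 1)) "]" : Int) =
    ((PySem.Str.count (pvJ tokens start idx) "[" : Int) -
      (PySem.Str.count (pvJ tokens start idx) "]" : Int)) +
    PySem.List.pyGetD (pvDeltas tokens) (idx + 1) 0 := by
  rw [pvJ_succ tokens start idx h, pvDeltas_getD]
  have hcomma : ("," : String).toList = [','] := by decide
  rw [str_count_lb, str_count_rb, str_count_lb, str_count_rb, str_count_lb, str_count_rb]
  simp only [String.toList_append, List.count_append, hcomma]
  simp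
  ring

-- B's loop is the identity once k has reached n.
theorem findB_loop_stop (n : Int) (deltas : List Int) :
    ∀ (fuel : Nat) (bal k : Int), n ≤ k → findB_loop n deltas fuel bal k = k := by
  intro fuel
  cases fuel with
  | zero => intro bal k _; rfl
  | succ f => intro bal k h; simp only [findB_loop]; rw [if_neg (by omega)]

-- Main loop correspondence: A about to test at idx (combined = J start idx) vs B about to
-- process k = idx with bal the prefix balance through idx-1.
theorem loop_equiv (tokens : List String) :
    ∀ (fuel : Nat) (idx bal start : Int), start ≤ idx → idx < (tokens.length : Int) →
      bal + PySem.List.pyGetD (pvDeltas tokens) idx 0 =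
        (PySem.Str.count (pvJ tokens start idx) "[" : Int) -
        (PySem.Str.count (pvJ tokens start idx) "]" : Int) →
      findA_loop tokens fuel (pvJ tokens start idx) idx =
        (pvJ tokens start
            (min (findB_loop (tokens.length : Int) (pvDeltas tokens) fuel bal idx + 1)
              (tokens.length : Int) - 1),
          findB_loop (tokens.length : Int) (pvDeltas tokens) fuel bal idx + 1) := by
  intro fuel
  induction fuel with
  | zero =>
    intro idx bal start _h1 h2 _h3
    simp only [findA_loop, findB_loop]
    rw [min_eq_left (by omega)]
    simp
  | succ f ih =>
    intro idx bal start h1 h2 h3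
    simp only [findA_loop, findB_loop]
    by_cases hb : (0 : Int) < bal + PySem.List.pyGetD (pvDeltas tokens) idx 0
    · rw [if_pos (by rw [h3] at hb; omega), if_pos (by omega : idx < (tokens.length : Int)),
        if_neg (by omega : ¬ bal + PySem.List.pyGetD (pvDeltas tokens) idx 0 ≤ 0)]
      by_cases hlen : (tokens.length : Int) ≤ idx + 1
      · rw [if_pos hlen,
          findB_loop_stop (tokens.length : Int) (pvDeltas tokens) f _ (idx + 1) hlen]
        rw [min_eq_right (by omega : (tokens.length : Int) ≤ idx + 1 + 1)]
        have hn : (tokens.length : Int) = idx + 1 := by omega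
        rw [hn]
        simp
        omega
      · rw [if_neg hlen]
        have hA : pvJ tokens start idx ++ "," ++ PySem.List.pyGetD tokens (idx + 1) "" =
            pvJ tokens start (idx + 1) := (pvJ_succ tokens start idx h1).symm
        rw [hA]
        exact ih (idx + 1) (bal + PySem.List.pyGetD (pvDeltas tokens) idx 0) start
          (by omega) (by omega)
          (by rw [pvDiff_succ tokens start idx h1, ← h3])
    · rw [if_neg (by rw [h3] at hb; omega), if_pos (by omega : idx < (tokens.length : Int)),
        if_pos (by omega : bal + PySem.List.pyGetD (pvDeltas tokens) idx 0 ≤ 0)]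
      rw [min_eq_left (by omega)]
      simp

-- ===== VERDICT (by name: the statement is the Claim_ definition above) =====
theorem find_vec3_token_py_spec : Claim_equal_find_vec3_token_py := by
  intro tokens start _hdom hpre
  unfold Spec_find_vec3_token_py find_vec3_token_py find_vec3_token_py_alt
  cases hg : PySem.List.pyGet? tokens start with
  | none =>
    exact absurd hpre ((PySem.List.pyGet?_eq_none_iff tokens start).mp hg)
  | some t0 =>
    have hlt : start < (tokens.length : Int) := by
      have := hpre
      unfold Pre_find_vec3_token_py PySem.Raise.InRange at this
      omega
    have hgetD : PySem.List.pyGetD tokens start "" = t0 := by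
      unfold PySem.List.pyGetD
      rw [hg]
      rfl
    have hJ : pvJ tokens start start = t0 := by
      unfold pvJ
      rw [show start + 1 = start + 1 by rfl, PySem.List.pyRange_one_singleton]
      simp only [List.map_cons, List.map_nil]
      rw [hgetD]
      apply String.toList_inj.mp
      rw [PySem.Str.toList_join]
      simp [PySem.Chars.join_singleton]
    have h := loop_equiv tokens (2 * tokens.length + 1) start 0 start le_rfl hlt
      (by rw [hJ, pvDeltas_getD, hgetD]; ring)
    rw [hJ] at h
    show findA_loop tokens (2 * tokens.length + 1) t0 start =
      (PySem.Str.join ","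
        ((PySem.List.pyRange start
            (min (findB_loop (tokens.length : Int) (pvDeltas tokens) (2 * tokens.length + 1) 0 start + 1)
              (tokens.length : Int)) 1).map (fun j => PySem.List.pyGetD tokens j "")),
        findB_loop (tokens.length : Int) (pvDeltas tokens) (2 * tokens.length + 1) 0 start + 1)
    rw [h]
    unfold pvJ
    have hmin : min (findB_loop (tokens.length : Int) (pvDeltas tokens) (2 * tokens.length + 1) 0 start + 1)
        (tokens.length : Int) - 1 + 1 =
      min (findB_loop (tokens.length : Int) (pvDeltas tokens) (2 * tokens.length + 1) 0 start + 1)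
        (tokens.length : Int) := by omega
    rw [hmin]
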